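-- pv_equiv track=rewrite | github.com/Lwasinam/mycotoxin-flask-api | api/index.py | generate_future_dates
-- ===== SOURCE A (Python) =====
-- def generate_future_dates(last_date_series, steps=5):
--     """Generates dicts for future year/month based on the last date."""
--     future_dates = []
--     # Ensure types are standard Python int
--     current_year = int(last_date_series['Year'])
--     current_month = int(last_date_series['Month'])
--
--     for _ in range(steps):
--         current_month += 1
--         if current_month > 12:
--             current_month = 1
--             current_year += 1
--         future_dates.append({'Year': current_year, 'Month': current_month})
--     return future_dates
-- ===== SOURCE B (Python) =====
-- def _month_after(year, month, i):
--     """The date i months after (year, month)."""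
--     q, m = divmod(month - 1 + i, 12)
--     return {'Year': year + q, 'Month': m + 1}
--
--
-- def generate_future_dates(last_date_series, steps=5):
--     """Generates dicts for future year/month based on the last date."""
--     year = int(last_date_series['Year'])
--     month = int(last_date_series['Month'])
--     return [_month_after(year, month, i) for i in range(1, steps + 1)]
-- ===== Notes on version B (the rewrite author's own statement) =====
-- stated objective: alternative
-- what changed: Replaces the stateful month/year carry loop (mutating accumulator with a >12 wrap branch) by a stateless per-index divmod closed form computing each future date directly from the start date and its offset.
-- intended difference: On inputs whose Month lies outside 0..12 (a malformed date) with steps >= 1, A returns accidental values (any month > 12 is wrapped to 1 after one step; negative months drift up one by one, emitting months <= 0), while B returns the date reached by calendar arithmetic, the intended value. — e.g. on generate_future_dates([("Year", 2020), ("Month", 13)], 2): A returns [[("Year", 2021), ("Month", 1)], [("Year", 2021), ("Month", 2)]], B returns [[("Year", 2021), ("Month", 2)], [("Year", 2021), ("Month", 3)]]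
import Mathlib
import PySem

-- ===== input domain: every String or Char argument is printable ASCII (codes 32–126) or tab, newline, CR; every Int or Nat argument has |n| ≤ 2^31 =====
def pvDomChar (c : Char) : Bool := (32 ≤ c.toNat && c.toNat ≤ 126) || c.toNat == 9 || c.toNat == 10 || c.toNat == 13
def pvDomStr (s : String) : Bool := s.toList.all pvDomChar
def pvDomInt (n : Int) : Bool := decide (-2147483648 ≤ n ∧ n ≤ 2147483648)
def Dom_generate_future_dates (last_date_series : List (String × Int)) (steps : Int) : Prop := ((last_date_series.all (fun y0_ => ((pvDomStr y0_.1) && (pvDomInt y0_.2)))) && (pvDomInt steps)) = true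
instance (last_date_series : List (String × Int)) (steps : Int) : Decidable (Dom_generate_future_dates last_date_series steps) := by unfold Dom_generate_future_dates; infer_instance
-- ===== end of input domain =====

-- B replaces A's stateful month-carry loop by a stateless per-index divmod closed form; on malformed months (outside 1..12) B's calendar arithmetic is the intended value (see D_).


-- ===== PORT A =====
-- one loop iteration of A: bump the month, wrap past 12, append the new dict
def pvStepA (st : Int × Int × List (List (String × Int))) : Int × Int × List (List (String × Int)) :=
  let m1 := st.2.1 + 1
  if m1 > 12 then (st.1 + 1, 1, st.2.2 ++ [[("Year", st.1 + 1), ("Month", (1 : Int))]])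
  else (st.1, m1, st.2.2 ++ [[("Year", st.1), ("Month", m1)]])

def generate_future_dates (last_date_series : List (String × Int)) (steps : Int) : List (List (String × Int)) :=
  let current_year := (last_date_series.lookup "Year").getD 0
  let current_month := (last_date_series.lookup "Month").getD 0
  ((PySem.List.pyRange 0 steps 1).foldl (fun st _ => pvStepA st)
    (current_year, current_month, [])).2.2

-- ===== PORT B =====
-- _month_after: the date i months after (year, month), via divmod (month - 1 + i) 12
def pvMonthAfter (year month i : Int) : List (String × Int) :=
  let q := PySem.Int.floordiv (month - 1 + i) 12
  let m := PySem.Int.mod (month - 1 + i) 12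
  [("Year", year + q), ("Month", m + 1)]

def generate_future_dates_alt (last_date_series : List (String × Int)) (steps : Int) : List (List (String × Int)) :=
  let year := (last_date_series.lookup "Year").getD 0
  let month := (last_date_series.lookup "Month").getD 0
  (PySem.List.pyRange 1 (steps + 1) 1).map (fun i => pvMonthAfter year month i)

-- ===== PRECONDITION & SPEC =====
-- A raises KeyError when the 'Year' or 'Month' key is missing; Pre_ requires both keys present.
def Pre_generate_future_dates (last_date_series : List (String × Int)) (steps : Int) : Prop :=
  (last_date_series.lookup "Year").isSome = true ∧ (last_date_series.lookup "Month").isSome = true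

instance (last_date_series : List (String × Int)) (steps : Int) : Decidable (Pre_generate_future_dates last_date_series steps) := by unfold Pre_generate_future_dates; infer_instance

def pvWitness_generate_future_dates : (List (String × Int)) × Int := ([("Year", 2023), ("Month", 11)], 5)

-- On inputs whose Month lies outside 0..12 (a malformed date) and steps >= 1, A returns accidental
-- values (any month > 12 is wrapped to 1 after one step; negative months drift up month by month,
-- emitting months <= 0), while B returns the date reached by calendar arithmetic, the intended value.
def D_generate_future_dates (last_date_series : List (String × Int)) (steps : Int) : Prop :=
  1 ≤ steps ∧ ((last_date_series.lookup "Month").getD 0 < 0 ∨ 12 < (last_date_series.lookup "Month").getD 0)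

instance (last_date_series : List (String × Int)) (steps : Int) : Decidable (D_generate_future_dates last_date_series steps) := by unfold D_generate_future_dates; infer_instance

def Spec_generate_future_dates (last_date_series : List (String × Int)) (steps : Int) (out : List (List (String × Int))) : Prop := ¬ D_generate_future_dates last_date_series steps → out = generate_future_dates_alt last_date_series steps
instance (last_date_series : List (String × Int)) (steps : Int) (out : List (List (String × Int))) : Decidable (Spec_generate_future_dates last_date_series steps out) := by unfold Spec_generate_future_dates; infer_instance

def pvDiffWitness_generate_future_dates : (List (String × Int)) × Int := ([("Year", 2020), ("Month", 13)], 2)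
def pvDiffWitnessOut_generate_future_dates : (List (List (String × Int))) × (List (List (String × Int))) :=
  ([[("Year", 2021), ("Month", 1)], [("Year", 2021), ("Month", 2)]],
   [[("Year", 2021), ("Month", 2)], [("Year", 2021), ("Month", 3)]])

-- ===== CLAIM (what is proved, stated in full; the proofs are below) =====
def Claim_unchanged_generate_future_dates : Prop := ∀ (last_date_series : List (String × Int)) (steps : Int), Dom_generate_future_dates last_date_series steps → Pre_generate_future_dates last_date_series steps → Spec_generate_future_dates last_date_series steps (generate_future_dates last_date_series steps)
def Claim_changed_generate_future_dates : Prop := Dom_generate_future_dates (pvDiffWitness_generate_future_dates.1) (pvDiffWitness_generate_future_dates.2) ∧ Pre_generate_future_dates (pvDiffWitness_generate_future_dates.1) (pvDiffWitness_generate_future_dates.2) ∧ D_generate_future_dates (pvDiffWitness_generate_future_dates.1) (pvDiffWitness_generate_future_dates.2) ∧ generate_future_dates (pvDiffWitness_generate_future_dates.1) (pvDiffWitness_generate_future_dates.2) = pvDiffWitnessOut_generate_future_dates.1 ∧ generate_future_dates_alt (pvDiffWitness_generate_future_dates.1) (pvDiffWitness_generate_future_dates.2) = pvDiffWitnessOut_generate_future_dates.2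 ∧ pvDiffWitnessOut_generate_future_dates.1 ≠ pvDiffWitnessOut_generate_future_dates.2
def Claim_exact_generate_future_dates : Prop := ∀ (last_date_series : List (String × Int)) (steps : Int), Dom_generate_future_dates last_date_series steps → Pre_generate_future_dates last_date_series steps → D_generate_future_dates last_date_series steps → generate_future_dates last_date_series steps ≠ generate_future_dates_alt last_date_series steps

-- ===== LEMMAS AND PROOFS =====

-- A's iteration from a month in 0..12 appends exactly B's closed form at offset 1
lemma stepA_head (y m : Int) (acc : List (List (String × Int))) (h1 : 0 ≤ m) (h2 : m ≤ 12) :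
    pvStepA (y, m, acc) =
      ((pvStepA (y, m, acc)).1, (pvStepA (y, m, acc)).2.1, acc ++ [pvMonthAfter y m 1]) := by
  have h12 : (0:Int) < 12 := by norm_num
  simp only [pvStepA, pvMonthAfter, PySem.Int.floordiv_eq_ediv_of_pos h12,
    PySem.Int.mod_eq_emod_of_pos h12]
  split_ifs with h1 h2 h2 <;> simp_all <;> constructor <;> omega

-- the month component of a step stays in 0..12
lemma stepA_month_bounds (y m : Int) (acc : List (List (String × Int))) (h1 : 0 ≤ m) (h2 : m ≤ 12) :
    0 ≤ (pvStepA (y, m, acc)).2.1 ∧ (pvStepA (y, m, acc)).2.1 ≤ 12 := by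
  simp only [pvStepA]; split_ifs <;> constructor <;> simp <;> omega

-- B's closed form from the stepped state equals B's closed form one offset later
lemma stepA_shift (y m i : Int) (acc : List (List (String × Int))) (h1 : 0 ≤ m) (h2 : m ≤ 12) :
    pvMonthAfter (pvStepA (y, m, acc)).1 (pvStepA (y, m, acc)).2.1 i = pvMonthAfter y m (i + 1) := by
  have h12 : (0:Int) < 12 := by norm_num
  simp only [pvStepA, pvMonthAfter, PySem.Int.floordiv_eq_ediv_of_pos h12,
    PySem.Int.mod_eq_emod_of_pos h12]
  split_ifs <;> simp_all <;> constructor <;> omega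

-- state components of a step do not depend on the accumulator
lemma stepA_state (y m : Int) (acc : List (List (String × Int))) :
    (pvStepA (y, m, acc)).1 = (pvStepA (y, m, [])).1 ∧
    (pvStepA (y, m, acc)).2.1 = (pvStepA (y, m, [])).2.1 := by
  simp only [pvStepA]; split_ifs <;> exact ⟨rfl, rfl⟩

-- loop invariant: folding A's step over any list yields the accumulator plus B's closed forms
lemma foldA_eq_map (l : List Int) :
    ∀ (y m : Int) (acc : List (List (String × Int))), 0 ≤ m → m ≤ 12 →
      ((l.foldl (fun st _ => pvStepA st) (y, m, acc)).2.2)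
        = acc ++ (List.range l.length).map (fun k : Nat => pvMonthAfter y m ((k : Int) + 1)) := by
  induction l with
  | nil => intro y m acc _ _; simp
  | cons x xs ih =>
    intro y m acc h1 h2
    have hstate := stepA_state y m acc
    have hbnd := stepA_month_bounds y m [] h1 h2
    calc ((((x :: xs).foldl (fun st _ => pvStepA st) (y, m, acc))).2.2)
        = ((xs.foldl (fun st _ => pvStepA st) (pvStepA (y, m, acc)))).2.2 := by
          simp [List.foldl_cons]
      _ = ((xs.foldl (fun st _ => pvStepA st)
            ((pvStepA (y, m, [])).1, (pvStepA (y, m, [])).2.1,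
              acc ++ [pvMonthAfter y m 1]))).2.2 := by
          rw [stepA_head y m acc h1 h2, hstate.1, hstate.2]
      _ = (acc ++ [pvMonthAfter y m 1]) ++
            (List.range xs.length).map
              (fun k : Nat => pvMonthAfter (pvStepA (y, m, [])).1 (pvStepA (y, m, [])).2.1 ((k : Int) + 1)) := by
          rw [ih _ _ _ hbnd.1 hbnd.2]
      _ = acc ++ (List.range (x :: xs).length).map (fun k : Nat => pvMonthAfter y m ((k : Int) + 1)) := by
          rw [List.append_assoc]
          congr 1
          rw [List.length_cons, List.range_succ_eq_map, List.map_cons, List.map_map,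
            List.singleton_append]
          have htail : ∀ k ∈ List.range xs.length,
              pvMonthAfter (pvStepA (y, m, [])).1 (pvStepA (y, m, [])).2.1 ((k : Int) + 1)
                = ((fun k : Nat => pvMonthAfter y m ((k : Int) + 1)) ∘ Nat.succ) k := by
            intro k _
            simp only [Function.comp]
            rw [stepA_shift y m ((k : Int) + 1) [] h1 h2]
            norm_num
          rw [List.map_congr_left htail]
          norm_num

-- the fold's output list always keeps its starting accumulator as a prefix
lemma foldA_acc_prefix (l : List Int) :
    ∀ (y m : Int) (acc : List (List (String × Int))),
      ((l.foldl (fun st _ => pvStepA st) (y, m, acc)).2.2)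
        = acc ++ ((l.foldl (fun st _ => pvStepA st) (y, m, [])).2.2) := by
  induction l with
  | nil => intro y m acc; simp
  | cons x xs ih =>
    intro y m acc
    have hstate := stepA_state y m acc
    have hacc : pvStepA (y, m, acc) =
        ((pvStepA (y, m, [])).1, (pvStepA (y, m, [])).2.1, acc ++ (pvStepA (y, m, [])).2.2) := by
      simp only [pvStepA]; split_ifs <;> simp
    simp only [List.foldl_cons]
    rw [hacc, ih]
    have h0 : pvStepA (y, m, []) =
        ((pvStepA (y, m, [])).1, (pvStepA (y, m, [])).2.1, (pvStepA (y, m, [])).2.2) := rfl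
    conv_rhs => rw [h0, ih]
    rw [List.append_assoc]

-- the same, stated over a whole state (by product eta)
lemma foldA_acc_prefix' (l : List Int) (st : Int × Int × List (List (String × Int))) :
    ((l.foldl (fun st _ => pvStepA st) st).2.2)
      = st.2.2 ++ ((l.foldl (fun st _ => pvStepA st) (st.1, st.2.1, [])).2.2) :=
  foldA_acc_prefix l st.1 st.2.1 st.2.2

-- ===== VERDICT (by name: the statement is the Claim_ definition above) =====
theorem generate_future_dates_spec : Claim_unchanged_generate_future_dates := by
  intro last_date_series steps _ _ hnd
  unfold D_generate_future_dates at hnd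
  unfold generate_future_dates generate_future_dates_alt
  by_cases hs : 1 ≤ steps
  · have hmr := not_or.mp (fun h => hnd ⟨hs, h⟩)
    have hm0 : 0 ≤ (last_date_series.lookup "Month").getD 0 := not_lt.mp hmr.1
    have hm12 : (last_date_series.lookup "Month").getD 0 ≤ 12 := not_lt.mp hmr.2
    rw [foldA_eq_map _ _ _ _ hm0 hm12]
    rw [PySem.List.pyRange_one 1 (steps + 1), PySem.List.pyRange_one 0 steps]
    simp only [List.nil_append, List.length_map, List.length_range, List.map_map,
      add_sub_cancel_right, sub_zero]
    apply List.map_congr_left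
    intro k _
    simp [Function.comp, add_comm]
  · have h0a : (steps - 0).toNat = 0 := by omega
    have h1 : PySem.List.pyRange 0 steps 1 = [] := by
      rw [PySem.List.pyRange_one, h0a]; simp
    have h0b : (steps + 1 - 1).toNat = 0 := by omega
    have h2 : PySem.List.pyRange 1 (steps + 1) 1 = [] := by
      rw [PySem.List.pyRange_one, h0b]; simp
    simp [h1, h2]

theorem generate_future_dates_changed : Claim_changed_generate_future_dates := by
  unfold Claim_changed_generate_future_dates; decide

theorem generate_future_dates_tight : Claim_exact_generate_future_dates := by
  intro last_date_series steps _ _ hd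
  obtain ⟨hs, hm⟩ := hd
  unfold generate_future_dates generate_future_dates_alt
  set y := (last_date_series.lookup "Year").getD 0 with hy
  set m := (last_date_series.lookup "Month").getD 0 with hmdef
  have hra := PySem.List.pyRange_one_cons (show (0:Int) < steps by omega)
  have hrb := PySem.List.pyRange_one_cons (show (1:Int) < steps + 1 by omega)
  norm_num at hra hrb
  rw [hra, hrb]
  simp only [List.foldl_cons, List.map_cons]
  rw [foldA_acc_prefix']
  intro hcontra
  have h12 : (0:Int) < 12 := by norm_num
  by_cases hbig : m + 1 > 12
  · have hsnd : (pvStepA (y, m, [])).2.2 = [[("Year", y + 1), ("Month", (1:Int))]] := by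
      simp [pvStepA, hbig]
    rw [hsnd, List.singleton_append] at hcontra
    simp only [List.cons.injEq, pvMonthAfter, PySem.Int.floordiv_eq_ediv_of_pos h12,
      PySem.Int.mod_eq_emod_of_pos h12, Prod.mk.injEq] at hcontra
    obtain ⟨⟨⟨-, hY⟩, ⟨-, hM⟩, -⟩, -⟩ := hcontra
    omega
  · have hsnd : (pvStepA (y, m, [])).2.2 = [[("Year", y), ("Month", m + 1)]] := by
      simp [pvStepA, hbig]
    rw [hsnd, List.singleton_append] at hcontra
    simp only [List.cons.injEq, pvMonthAfter, PySem.Int.floordiv_eq_ediv_of_pos h12,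
      PySem.Int.mod_eq_emod_of_pos h12, Prod.mk.injEq] at hcontra
    obtain ⟨⟨⟨-, hY⟩, ⟨-, hM⟩, -⟩, -⟩ := hcontra
    omega
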